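-- pv_equiv track=rewrite | github.com/zeeshan4002911/DSA-reloaded | 1.data-structure/8.deque/easy/generate-sequence-by-inserting-position.py | generate_sequence_by_inserting_position
-- ===== SOURCE A (Python) =====
-- from collections import deque
--
-- def generate_sequence_by_inserting_position(s):
--     result = deque()
--     n = len(s)
--     # Last element to starts with
--     result.append(n)
--
--     # To simplify the sequence generation backward iteration is needed
--     for i in range(n - 1, -1, -1):
--         # The operation becomes reverse as we are coming from back
--         if s[i] == "F":
--             result.append(i)
--         elif s[i] == "B":
--             result.appendleft(i)
--
--     return list(result)
-- ===== SOURCE B (Python) =====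
-- def generate_sequence_by_inserting_position(s):
--     n = len(s)
--     left = [i for i in range(n) if s[i] == "B"]
--     right = [i for i in range(n - 1, -1, -1) if s[i] == "F"]
--     return left + [n] + right
-- ===== Notes on version B (the rewrite author's own statement) =====
-- stated objective: simpler
-- what changed: Replaces the deque built by one backward branching loop (append/appendleft) with two filtered index passes (ascending 'B' indices, descending 'F' indices) concatenated around n.
import Mathlib
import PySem

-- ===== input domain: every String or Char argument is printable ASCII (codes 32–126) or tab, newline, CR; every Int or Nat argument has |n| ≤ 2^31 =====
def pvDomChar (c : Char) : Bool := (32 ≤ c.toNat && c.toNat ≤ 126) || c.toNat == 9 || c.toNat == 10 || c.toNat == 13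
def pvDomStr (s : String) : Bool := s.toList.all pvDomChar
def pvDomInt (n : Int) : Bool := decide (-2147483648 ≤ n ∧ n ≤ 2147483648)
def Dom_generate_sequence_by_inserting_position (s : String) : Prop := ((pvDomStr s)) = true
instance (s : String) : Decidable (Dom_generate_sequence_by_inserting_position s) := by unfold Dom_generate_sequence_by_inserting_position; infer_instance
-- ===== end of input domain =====

-- B replaces A's backward deque loop by two filtered index passes concatenated around n (simpler; same cost).

-- ===== PORT A =====
-- loop body of A: append on 'F', appendleft on 'B', skip otherwise (deque as a plain list)
def pvStepA (s : String) (result : List Int) (i : Int) : List Int :=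
  if PySem.Str.pyGet? s i = some 'F' then result ++ [i]
  else if PySem.Str.pyGet? s i = some 'B' then i :: result
  else result

def generate_sequence_by_inserting_position (s : String) : List Int :=
  let n : Int := PySem.Str.len s
  (PySem.List.pyRange (n - 1) (-1) (-1)).foldl (pvStepA s) [n]

-- ===== PORT B =====
def generate_sequence_by_inserting_position_alt (s : String) : List Int :=
  let n : Int := PySem.Str.len s
  let left := (PySem.List.pyRange 0 n 1).filter (fun i => PySem.Str.pyGet? s i = some 'B')
  let right := (PySem.List.pyRange (n - 1) (-1) (-1)).filter (fun i => PySem.Str.pyGet? s i = some 'F')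
  left ++ [n] ++ right

-- ===== PRECONDITION & SPEC =====
def Spec_generate_sequence_by_inserting_position (s : String) (out : List Int) : Prop := out = generate_sequence_by_inserting_position_alt s
instance (s : String) (out : List Int) : Decidable (Spec_generate_sequence_by_inserting_position s out) := by unfold Spec_generate_sequence_by_inserting_position; infer_instance

-- ===== CLAIM (what is proved, stated in full; the proofs are below) =====
def Claim_equal_generate_sequence_by_inserting_position : Prop := ∀ (s : String), Dom_generate_sequence_by_inserting_position s → Spec_generate_sequence_by_inserting_position s (generate_sequence_by_inserting_position s)

-- ===== LEMMAS AND PROOFS =====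

-- loop invariant: folding the countdown range k-1,…,0 sandwiches acc between the
-- ascending 'B' indices below k and the descending 'F' indices below k
theorem pv_loop_eq (s : String) (k : Nat) (acc : List Int) :
    (PySem.List.pyRange ((k : Int) - 1) (-1) (-1)).foldl (pvStepA s) acc
      = (PySem.List.pyRange 0 (k : Int) 1).filter (fun i => PySem.Str.pyGet? s i = some 'B')
        ++ acc
        ++ (PySem.List.pyRange ((k : Int) - 1) (-1) (-1)).filter (fun i => PySem.Str.pyGet? s i = some 'F') := by
  induction k generalizing acc with
  | zero =>
      simp [PySem.List.pyRange_one_eq_nil (le_refl (0 : Int))]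
  | succ m ih =>
      have h1 : ((m + 1 : Nat) : Int) - 1 = (m : Int) := by push_cast; ring
      rw [h1]
      rw [PySem.List.pyRange_neg_one_cons (by exact_mod_cast (by omega : (-1 : Int) < (m : Int)))]
      have h2 : (m : Int) - 1 = ((m : Nat) : Int) - 1 := by norm_cast
      rw [List.foldl_cons]
      have hr : PySem.List.pyRange 0 ((m + 1 : Nat) : Int) 1
          = PySem.List.pyRange 0 (m : Int) 1 ++ [(m : Int)] := by
        have : ((m + 1 : Nat) : Int) = (m : Int) + 1 := by push_cast; ring
        rw [this, PySem.List.pyRange_one_succ_right (by positivity)]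
      rw [hr, ih]
      unfold pvStepA
      by_cases hF : s.toList[m]? = some 'F'
      · simp [hF, List.filter_append]
      · by_cases hB : s.toList[m]? = some 'B'
        · simp [hB, List.filter_append]
        · simp [hF, hB, List.filter_append]

-- ===== VERDICT (by name: the statement is the Claim_ definition above) =====
theorem generate_sequence_by_inserting_position_spec : Claim_equal_generate_sequence_by_inserting_position := by
  intro s _
  unfold Spec_generate_sequence_by_inserting_position
  unfold generate_sequence_by_inserting_position generate_sequence_by_inserting_position_alt
  have hlen : PySem.Str.len s = (s.toList.length : Int) := by
    simp [PySem.Str.len]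
  rw [hlen]
  exact pv_loop_eq s s.toList.length [(s.toList.length : Int)]
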